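-- pv_equiv track=rewrite | github.com/posl/comment_recommendation | script/split_gen/2_time/zh/118_A/2.py | xor_sum
-- ===== SOURCE A (Python) =====
-- def xor_sum(a, b):
--     if a == b:
--         return a
--     if b - a == 1:
--         return a ^ b
--     if a % 2 == 0 and b % 2 == 0:
--         return xor_sum(a // 2, b // 2) * 2
--     if a % 2 == 0 and b % 2 == 1:
--         return xor_sum(a // 2, b // 2) * 2 + 1
--     if a % 2 == 1 and b % 2 == 0:
--         return xor_sum((a + 1) // 2, b // 2) * 2
--     if a % 2 == 1 and b % 2 == 1:
--         return xor_sum((a + 1) // 2, b // 2) * 2 + 1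
-- ===== SOURCE B (Python) =====
-- def xor_sum(a, b):
--     # Phase 1: iterate instead of recursing; collect the low bit of b at each level.
--     bits = []
--     while a != b and b - a != 1:
--         bits.append(b % 2)
--         a = (a + 1) // 2   # ceil(a/2): a//2 if a even, (a+1)//2 if a odd
--         b = b // 2
--     base = a if a == b else a ^ b
--     # Phase 2: rebuild the result from the recorded bits, innermost first.
--     result = base
--     for bit in reversed(bits):
--         result = result * 2 + bit
--     return result
-- ===== Notes on version B (the rewrite author's own statement) =====
-- stated objective: alternative
-- what changed: Replaces the four-branch recursion by an iterative two-phase computation: a loop halves the endpoints while recording b's low bit, then a fold over the reversed bit list rebuilds the result from the base case.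
import Mathlib
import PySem

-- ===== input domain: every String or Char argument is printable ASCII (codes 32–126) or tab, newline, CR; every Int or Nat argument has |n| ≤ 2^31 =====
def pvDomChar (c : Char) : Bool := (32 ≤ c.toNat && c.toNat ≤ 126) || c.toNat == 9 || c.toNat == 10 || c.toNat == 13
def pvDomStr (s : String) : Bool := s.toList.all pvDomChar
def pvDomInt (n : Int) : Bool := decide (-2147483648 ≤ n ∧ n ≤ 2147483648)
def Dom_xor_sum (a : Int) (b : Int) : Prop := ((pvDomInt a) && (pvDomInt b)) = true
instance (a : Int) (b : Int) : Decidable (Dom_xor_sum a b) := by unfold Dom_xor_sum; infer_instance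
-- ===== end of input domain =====

-- B replaces A's four-branch recursion by an iterative two-phase computation (collect bits, then rebuild); same cost.
-- Pre_ excludes a > b, where A's recursion never reaches a base case and raises RecursionError (B's loop likewise diverges).


-- ===== PORT A =====
-- Literal port of A's recursion; the fuel parameter only makes the (Python-divergent for a > b)
-- recursion total, it is (b-a).natAbs + 1 at the top call, which is enough whenever a ≤ b.
def xorSumFuelA : Nat → Int → Int → Int
  | 0, _, _ => 0   -- fuel exhausted: only reachable outside Pre_ (Python diverges there)
  | n+1, a, b =>
    if a = b then a
    else if b - a = 1 then PySem.Int.bxor a b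
    else if PySem.Int.mod a 2 = 0 ∧ PySem.Int.mod b 2 = 0 then
      xorSumFuelA n (PySem.Int.floordiv a 2) (PySem.Int.floordiv b 2) * 2
    else if PySem.Int.mod a 2 = 0 ∧ PySem.Int.mod b 2 = 1 then
      xorSumFuelA n (PySem.Int.floordiv a 2) (PySem.Int.floordiv b 2) * 2 + 1
    else if PySem.Int.mod a 2 = 1 ∧ PySem.Int.mod b 2 = 0 then
      xorSumFuelA n (PySem.Int.floordiv (a + 1) 2) (PySem.Int.floordiv b 2) * 2
    else if PySem.Int.mod a 2 = 1 ∧ PySem.Int.mod b 2 = 1 then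
      xorSumFuelA n (PySem.Int.floordiv (a + 1) 2) (PySem.Int.floordiv b 2) * 2 + 1
    else 0   -- unreachable: a % 2 ∈ {0,1} in Python (Python would fall off returning None)

def xor_sum (a : Int) (b : Int) : Int := xorSumFuelA ((b - a).natAbs + 1) a b

-- ===== PORT B =====
-- Phase 1 of Source B: the while loop, with the same totality fuel as A's port.
def xorPhase1 : Nat → Int → Int → List Int → List Int × Int
  | 0, _, _, bits => (bits, 0)   -- fuel exhausted: only reachable outside Pre_
  | n+1, a, b, bits =>
    if a = b then (bits, a)
    else if b - a = 1 then (bits, PySem.Int.bxor a b)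
    else xorPhase1 n (PySem.Int.floordiv (a + 1) 2) (PySem.Int.floordiv b 2)
           (bits ++ [PySem.Int.mod b 2])

-- Phase 2 of Source B: fold over the reversed bits list.
def xor_sum_alt (a : Int) (b : Int) : Int :=
  let p := xorPhase1 ((b - a).natAbs + 1) a b []
  p.1.reverse.foldl (fun r bit => r * 2 + bit) p.2

-- ===== PRECONDITION & SPEC =====
-- Pre_ excludes a > b: there Python A recurses forever (RecursionError) and B's loop diverges too.
def Pre_xor_sum (a : Int) (b : Int) : Prop := a ≤ b
instance (a : Int) (b : Int) : Decidable (Pre_xor_sum a b) := by unfold Pre_xor_sum; infer_instance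
def pvWitness_xor_sum : Int × Int := (3, 9)
def Spec_xor_sum (a : Int) (b : Int) (out : Int) : Prop := out = xor_sum_alt a b
instance (a : Int) (b : Int) (out : Int) : Decidable (Spec_xor_sum a b out) := by unfold Spec_xor_sum; infer_instance

-- ===== CLAIM (what is proved, stated in full; the proofs are below) =====
def Claim_equal_xor_sum : Prop := ∀ (a : Int) (b : Int), Dom_xor_sum a b → Pre_xor_sum a b → Spec_xor_sum a b (xor_sum a b)

-- ===== LEMMAS AND PROOFS =====

-- A's four parity branches collapse to one uniform step: next a = (a+1)//2, the added bit = b % 2.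
theorem xorSumFuelA_step (n : Nat) (a b : Int) (hab : ¬ a = b) (hgap : ¬ b - a = 1) :
    xorSumFuelA (n+1) a b
      = xorSumFuelA n (PySem.Int.floordiv (a + 1) 2) (PySem.Int.floordiv b 2) * 2
          + PySem.Int.mod b 2 := by
  have h2 : (0:Int) < 2 := by norm_num
  have hea := PySem.Int.mod_eq_emod_of_pos (a := a) h2
  have heb := PySem.Int.mod_eq_emod_of_pos (a := b) h2
  have hma : a % 2 = 0 ∨ a % 2 = 1 := by omega
  have hmb : b % 2 = 0 ∨ b % 2 = 1 := by omega
  rcases hma with ha | ha <;> rcases hmb with hb | hb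
  · have he : (a + 1) / 2 = a / 2 := by omega
    simp [xorSumFuelA, hab, hgap, ha, hb, he]
  · have he : (a + 1) / 2 = a / 2 := by omega
    simp [xorSumFuelA, hab, hgap, ha, hb, he]
  · simp [xorSumFuelA, hab, hgap, ha, hb]
  · simp [xorSumFuelA, hab, hgap, ha, hb]

-- Rebuilding interpretation of a (bits, base) pair.
def xorRebuild (p : List Int × Int) : Int :=
  p.1.reverse.foldl (fun r bit => r * 2 + bit) p.2

theorem xorRebuild_snoc (bits : List Int) (m v : Int) :
    xorRebuild (bits ++ [m], v) = xorRebuild (bits, v * 2 + m) := by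
  simp [xorRebuild]

-- Main invariant: for ANY fuel, rebuilding phase-1's output equals rebuilding the
-- accumulator around A's fueled recursion.
theorem xorPhase1_rebuild (n : Nat) : ∀ (a b : Int) (bits : List Int),
    xorRebuild (xorPhase1 n a b bits) = xorRebuild (bits, xorSumFuelA n a b) := by
  induction n with
  | zero => intro a b bits; simp [xorPhase1, xorSumFuelA]
  | succ n ih =>
    intro a b bits
    by_cases hab : a = b
    · simp [xorPhase1, xorSumFuelA, hab]
    · by_cases hgap : b - a = 1
      · simp [xorPhase1, xorSumFuelA, hab, hgap]
      · rw [show xorPhase1 (n+1) a b bits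
              = xorPhase1 n (PySem.Int.floordiv (a + 1) 2) (PySem.Int.floordiv b 2)
                  (bits ++ [PySem.Int.mod b 2]) by simp [xorPhase1, hab, hgap]]
        rw [ih, xorRebuild_snoc, xorSumFuelA_step n a b hab hgap]

-- ===== VERDICT (by name: the statement is the Claim_ definition above) =====
theorem xor_sum_spec : Claim_equal_xor_sum := by
  intro a b _ _
  unfold Spec_xor_sum xor_sum xor_sum_alt
  have h := xorPhase1_rebuild ((b - a).natAbs + 1) a b []
  simpa [xorRebuild] using h.symm
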